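-- pv_equiv track=rewrite | github.com/robin-libert/projet-simulation | tests.pi.py | gapList
-- ===== SOURCE A (Python) =====
-- def gapList(randomNumberList, n):
--     gapList = [0]*1000
--     gap = 1
--     begin = False
--     for e in randomNumberList:
--         if begin == True and e == n:
--             if(gap <= len(gapList)):
--                 gapList[gap-1] += 1
--             gap = 1
--         elif begin == False and e == n:
--             begin = True
--         elif begin == True and e != n:
--             gap += 1
--     acc = 0
--     for e in range(-1,-len(gapList)-1,-1):
--         acc += gapList[e]
--         gapList[e] = acc
--     return gapList
-- ===== SOURCE B (Python) =====
-- def gapList(randomNumberList, n):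
--     positions = [i for i, e in enumerate(randomNumberList) if e == n]
--     gaps = [q - p for p, q in zip(positions, positions[1:])]
--     return [sum(1 for g in gaps if i + 1 <= g <= 1000) for i in range(1000)]
-- ===== Notes on version B (the rewrite author's own statement) =====
-- stated objective: alternative
-- what changed: Replaces A's online begin/gap state machine plus in-place backward cumulative pass with a collect-then-tabulate decomposition: gather occurrence positions, take consecutive differences as gaps, and fill each output slot i by counting gaps in [i+1, 1000].
import Mathlib
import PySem

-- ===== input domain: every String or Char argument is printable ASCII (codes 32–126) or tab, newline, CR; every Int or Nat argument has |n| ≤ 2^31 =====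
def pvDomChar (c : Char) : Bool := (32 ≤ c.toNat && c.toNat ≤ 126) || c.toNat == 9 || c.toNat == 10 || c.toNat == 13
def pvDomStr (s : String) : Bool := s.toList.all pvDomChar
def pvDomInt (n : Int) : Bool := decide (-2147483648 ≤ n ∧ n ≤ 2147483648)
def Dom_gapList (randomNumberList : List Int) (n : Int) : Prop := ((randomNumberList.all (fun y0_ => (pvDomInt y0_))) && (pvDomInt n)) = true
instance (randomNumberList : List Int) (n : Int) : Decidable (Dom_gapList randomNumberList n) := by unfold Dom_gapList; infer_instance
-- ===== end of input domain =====

-- B replaces A's online begin/gap state machine by collecting occurrence positions, taking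
-- consecutive differences, and counting gaps in [i+1, 1000] per output slot (alternative decomposition).

-- ===== PORT A =====
-- one iteration of A's first for-loop; state = (gapList, gap, begin), branches in source order.
-- pyGetD/pySetD are exact here: the branch guard gives gap ≤ len and A keeps 1 ≤ gap throughout.
def gapStep (n : Int) (st : List Int × Int × Bool) (e : Int) : List Int × Int × Bool :=
  if st.2.2 = true ∧ e = n then
    ((if st.2.1 ≤ (st.1.length : Int) then
        PySem.List.pySetD st.1 (st.2.1 - 1) (PySem.List.pyGetD st.1 (st.2.1 - 1) 0 + 1)
      else st.1), 1, st.2.2)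
  else if st.2.2 = false ∧ e = n then (st.1, st.2.1, true)
  else if st.2.2 = true ∧ e ≠ n then (st.1, st.2.1 + 1, st.2.2)
  else st

-- one iteration of A's second for-loop: acc += gapList[e]; gapList[e] = acc (e a negative index)
def suffStep (st : Int × List Int) (e : Int) : Int × List Int :=
  let acc := st.1 + PySem.List.pyGetD st.2 e 0
  (acc, PySem.List.pySetD st.2 e acc)

def gapList (randomNumberList : List Int) (n : Int) : List Int :=
  let st := randomNumberList.foldl (gapStep n) (List.replicate 1000 (0 : Int), 1, false)
  ((PySem.List.pyRange (-1) (-(st.1.length : Int) - 1) (-1)).foldl suffStep (0, st.1)).2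

-- ===== PORT B =====
def gapList_alt (randomNumberList : List Int) (n : Int) : List Int :=
  let positions := (PySem.List.enumerate randomNumberList).filterMap
      (fun p => if p.2 = n then some p.1 else none)
  let gaps := (positions.zip positions.tail).map (fun p => p.2 - p.1)
  (PySem.List.pyRange 0 1000 1).map
      (fun i => (gaps.countP (fun g => decide (i + 1 ≤ g ∧ g ≤ 1000)) : Int))

-- ===== PRECONDITION & SPEC =====
def Spec_gapList (randomNumberList : List Int) (n : Int) (out : List Int) : Prop := out = gapList_alt randomNumberList n
instance (randomNumberList : List Int) (n : Int) (out : List Int) : Decidable (Spec_gapList randomNumberList n out) := by unfold Spec_gapList; infer_instance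

-- ===== CLAIM (what is proved, stated in full; the proofs are below) =====
def Claim_equal_gapList : Prop := ∀ (randomNumberList : List Int) (n : Int), Dom_gapList randomNumberList n → Spec_gapList randomNumberList n (gapList randomNumberList n)

-- ===== LEMMAS AND PROOFS =====

-- the increment A performs on the histogram for one recorded gap g
def inc (h : List Int) (g : Int) : List Int :=
  if g ≤ (h.length : Int) then
    PySem.List.pySetD h (g - 1) (PySem.List.pyGetD h (g - 1) 0 + 1)
  else h

-- the gaps A records after the first occurrence, current counter = gap
def gapsFrom (n gap : Int) : List Int → List Int
  | [] => []
  | e :: t => if e = n then gap :: gapsFrom n 1 t else gapsFrom n (gap + 1) t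

-- the gaps A records on the whole list (skip up to the first occurrence)
def gapsAll (n : Int) : List Int → List Int
  | [] => []
  | e :: t => if e = n then gapsFrom n 1 t else gapsAll n t

-- positions of n in the list, indices starting at s
def posFrom (n s : Int) : List Int → List Int
  | [] => []
  | e :: t => if e = n then s :: posFrom n (s + 1) t else posFrom n (s + 1) t

-- consecutive differences, previous element p
def diffsFrom (p : Int) : List Int → List Int
  | [] => []
  | q :: r => (q - p) :: diffsFrom q r

def diffs : List Int → List Int
  | [] => []
  | p :: r => diffsFrom p r

-- suffix sums shifted by acc
def suffAcc (acc : Int) : List Int → List Int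
  | [] => []
  | x :: t => (acc + x + t.sum) :: suffAcc acc t

lemma foldA_true (n : Int) (l : List Int) : ∀ (h : List Int) (gap : Int),
    (l.foldl (gapStep n) (h, gap, true)).1 = (gapsFrom n gap l).foldl inc h := by
  induction l with
  | nil => intro h gap; rfl
  | cons e t ih =>
    intro h gap
    by_cases he : e = n <;>
      simp [gapStep, gapsFrom, he, inc, ih]

lemma foldA_false (n : Int) (l : List Int) : ∀ (h : List Int),
    (l.foldl (gapStep n) (h, 1, false)).1 = (gapsAll n l).foldl inc h := by
  induction l with
  | nil => intro h; rfl
  | cons e t ih =>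
    intro h
    by_cases he : e = n <;>
      simp [gapStep, gapsAll, he, ih, foldA_true]

lemma length_inc (h : List Int) (g : Int) : (inc h g).length = h.length := by
  unfold inc; split_ifs <;> simp [PySem.List.length_pySetD]

lemma length_foldl_inc (gaps : List Int) : ∀ h : List Int,
    (gaps.foldl inc h).length = h.length := by
  induction gaps with
  | nil => intro h; rfl
  | cons g gs ih => intro h; simp [List.foldl_cons, ih, length_inc]

lemma sum_drop_set_succ (h : List Int) : ∀ (k i : Nat) (hk : k < h.length),
    ((h.set k (h[k] + 1)).drop i).sum = (h.drop i).sum + (if i ≤ k then 1 else 0) := by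
  induction h with
  | nil => intro k i hk; simp at hk
  | cons x t ih =>
    intro k i hk
    cases k with
    | zero =>
      cases i with
      | zero => simp; ring
      | succ s => simp
    | succ k' =>
      cases i with
      | zero =>
        have := ih k' 0 (by simpa using hk)
        simp at this ⊢
        omega
      | succ s =>
        have := ih k' s (by simpa using hk)
        simpa using this

lemma inc_drop_sum (h : List Int) (g : Int) (hg : 1 ≤ g) (i : Nat) :
    ((inc h g).drop i).sum
      = (h.drop i).sum + (if (i : Int) + 1 ≤ g ∧ g ≤ (h.length : Int) then 1 else 0) := by
  unfold inc
  by_cases hle : g ≤ (h.length : Int)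
  · have h0 : (0 : Int) ≤ g - 1 := by omega
    have h1 : g - 1 < (h.length : Int) := by omega
    have hk : (g - 1).toNat < h.length := by omega
    rw [if_pos hle, PySem.List.pySetD_of_nonneg _ _ h0,
        PySem.List.pyGetD_eq_getElem _ _ h0 h1,
        sum_drop_set_succ h (g - 1).toNat i hk]
    congr 1
    have : ((g - 1).toNat : Int) = g - 1 := Int.toNat_of_nonneg h0
    by_cases hc : i ≤ (g - 1).toNat
    · rw [if_pos hc, if_pos ⟨by omega, hle⟩]
    · rw [if_neg hc, if_neg (by intro hcc; exact hc (by omega))]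
  · rw [if_neg hle, if_neg (by intro hcc; exact hle hcc.2)]
    simp

lemma foldl_inc_drop_sum (gaps : List Int) (hpos : ∀ g ∈ gaps, 1 ≤ g) :
    ∀ (h : List Int) (i : Nat),
    ((gaps.foldl inc h).drop i).sum
      = (h.drop i).sum
        + (gaps.countP (fun g => decide ((i : Int) + 1 ≤ g ∧ g ≤ (h.length : Int))) : Int) := by
  induction gaps with
  | nil => intro h i; simp
  | cons g gs ih =>
    intro h i
    have hg : 1 ≤ g := hpos g (by simp)
    have hih := ih (fun x hx => hpos x (by simp [hx])) (inc h g) i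
    rw [List.foldl_cons, hih, length_inc, inc_drop_sum h g hg i, List.countP_cons]
    by_cases hc : (i : Int) + 1 ≤ g ∧ g ≤ (h.length : Int) <;>
      simp [hc] <;> ring

lemma gapsFrom_pos (n : Int) (l : List Int) : ∀ gap : Int, 1 ≤ gap →
    ∀ g ∈ gapsFrom n gap l, 1 ≤ g := by
  induction l with
  | nil => intro gap _ g hg; simp [gapsFrom] at hg
  | cons e t ih =>
    intro gap hgap g hg
    by_cases he : e = n <;> simp [gapsFrom, he] at hg
    · rcases hg with rfl | hg
      · exact hgap
      · exact ih 1 le_rfl g hg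
    · exact ih (gap + 1) (by omega) g hg

lemma gapsAll_pos (n : Int) (l : List Int) : ∀ g ∈ gapsAll n l, 1 ≤ g := by
  induction l with
  | nil => intro g hg; simp [gapsAll] at hg
  | cons e t ih =>
    intro g hg
    by_cases he : e = n <;> simp [gapsAll, he] at hg
    · exact gapsFrom_pos n t 1 le_rfl g hg
    · exact ih g hg

lemma filterMap_enumerate (n : Int) (l : List Int) : ∀ s : Int,
    (PySem.List.enumerate l s).filterMap (fun p => if p.2 = n then some p.1 else none)
      = posFrom n s l := by
  induction l with
  | nil => intro s; simp [PySem.List.enumerate_nil, posFrom]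
  | cons e t ih =>
    intro s
    by_cases he : e = n <;>
      simp [PySem.List.enumerate_cons, he, posFrom, ih]

lemma zipmap_aux (rest : List Int) : ∀ p : Int,
    ((p :: rest).zip rest).map (fun q => q.2 - q.1) = diffsFrom p rest := by
  induction rest with
  | nil => intro p; rfl
  | cons q r ih => intro p; simp [List.zip_cons_cons, diffsFrom, ih q]

lemma zipmap (ps : List Int) :
    (ps.zip ps.tail).map (fun q => q.2 - q.1) = diffs ps := by
  cases ps with
  | nil => rfl
  | cons p rest => simpa [diffs] using zipmap_aux rest p

lemma diffsFrom_posFrom (n : Int) (l : List Int) : ∀ k p : Int,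
    diffsFrom p (posFrom n k l) = gapsFrom n (k - p) l := by
  induction l with
  | nil => intro k p; rfl
  | cons e t ih =>
    intro k p
    by_cases he : e = n
    · have h1 : k + 1 - k = 1 := by ring
      simp [posFrom, gapsFrom, he, diffsFrom, ih (k + 1) k, h1]
    · have h2 : k + 1 - p = k - p + 1 := by ring
      simp [posFrom, gapsFrom, he, ih (k + 1) p, h2]

lemma diffs_posFrom (n : Int) (l : List Int) : ∀ k : Int,
    diffs (posFrom n k l) = gapsAll n l := by
  induction l with
  | nil => intro k; rfl
  | cons e t ih =>
    intro k
    by_cases he : e = n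
    · have h1 : k + 1 - k = 1 := by ring
      simp [posFrom, gapsAll, he, diffs, diffsFrom_posFrom n t (k + 1) k, h1]
    · simp [posFrom, gapsAll, he, ih (k + 1)]

lemma suffAcc_append (t : List Int) : ∀ (acc x : Int),
    suffAcc acc (t ++ [x]) = suffAcc (acc + x) t ++ [acc + x] := by
  induction t with
  | nil => intro acc x; simp [suffAcc]
  | cons y t' ih =>
    intro acc x
    simp [suffAcc, ih acc x]
    ring

lemma length_suffAcc (acc : Int) (h : List Int) : (suffAcc acc h).length = h.length := by
  induction h generalizing acc with
  | nil => rfl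
  | cons x t ih => simp [suffAcc, ih]

lemma getElem_suffAcc (h : List Int) : ∀ (acc : Int) (i : Nat) (hi : i < h.length),
    (suffAcc acc h)[i]'(by rw [length_suffAcc]; exact hi) = acc + (h.drop i).sum := by
  induction h with
  | nil => intro acc i hi; simp at hi
  | cons x t ih =>
    intro acc i hi
    cases i with
    | zero => simp [suffAcc]; ring
    | succ s => simpa [suffAcc] using ih acc s (by simpa using hi)

lemma pyGetD_mid (t suf : List Int) (x d : Int) :
    PySem.List.pyGetD (t ++ x :: suf) (-(suf.length : Int) - 1) d = x := by
  have hlen : (-(↑(t ++ x :: suf).length) : Int) ≤ -(suf.length : Int) - 1 := by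
    simp; omega
  have htn : (-(-(suf.length : Int) - 1)).toNat = suf.length + 1 := by omega
  simp only [PySem.List.pyGetD, PySem.List.pyGet?, PySem.List.pyIdx?]
  rw [if_neg (by omega), if_pos hlen, htn]
  have hidx : (t ++ x :: suf).length - (suf.length + 1) = t.length := by
    simp
  rw [hidx]
  simp

lemma set_append_mid (t : List Int) : ∀ (x v : Int) (suf : List Int),
    (t ++ x :: suf).set t.length v = t ++ v :: suf := by
  induction t with
  | nil => intro x v suf; rfl
  | cons y t' ih => intro x v suf; simp [List.set_cons_succ, ih]

lemma pySetD_mid (t suf : List Int) (x v : Int) :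
    PySem.List.pySetD (t ++ x :: suf) (-(suf.length : Int) - 1) v = t ++ v :: suf := by
  have hlen : (-(↑(t ++ x :: suf).length) : Int) ≤ -(suf.length : Int) - 1 := by
    simp; omega
  have htn : (-(-(suf.length : Int) - 1)).toNat = suf.length + 1 := by omega
  simp only [PySem.List.pySetD, PySem.List.pySet?, PySem.List.pyIdx?]
  rw [if_neg (by omega), if_pos hlen, htn]
  have hidx : (t ++ x :: suf).length - (suf.length + 1) = t.length := by
    simp
  rw [hidx]
  simp [set_append_mid t x v suf]

lemma foldl_suffStep (pre : List Int) : ∀ (suf : List Int) (acc : Int),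
    ((PySem.List.pyRange (-(suf.length : Int) - 1)
        (-((pre.length : Int) + (suf.length : Int)) - 1) (-1)).foldl
      suffStep (acc, pre ++ suf))
      = (acc + pre.sum, suffAcc acc pre ++ suf) := by
  induction pre using List.reverseRecOn with
  | nil =>
    intro suf acc
    rw [PySem.List.pyRange_neg_one_eq_nil (by simp)]
    simp [suffAcc]
  | append_singleton t x ih =>
    intro suf acc
    rw [PySem.List.pyRange_neg_one_cons (by simp; omega)]
    rw [List.foldl_cons]
    have hstep : suffStep (acc, (t ++ [x]) ++ suf) (-(suf.length : Int) - 1)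
        = (acc + x, t ++ (acc + x) :: suf) := by
      simp only [suffStep, List.append_assoc, List.singleton_append]
      rw [pyGetD_mid t suf x 0, pySetD_mid t suf x (acc + x)]
    rw [hstep]
    have ha : -(suf.length : Int) - 1 - 1 = -(((acc + x) :: suf).length : Int) - 1 := by
      simp; omega
    have hb : -(((t ++ [x]).length : Int) + (suf.length : Int)) - 1
        = -((t.length : Int) + ((((acc + x) :: suf)).length : Int)) - 1 := by
      simp; omega
    rw [ha, hb, ih ((acc + x) :: suf) (acc + x)]
    rw [suffAcc_append t acc x]
    simp
    ring

-- B's output, elementwise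
lemma gapList_alt_eq (l : List Int) (n : Int) :
    gapList_alt l n
      = (PySem.List.pyRange 0 1000 1).map
          (fun i => ((gapsAll n l).countP (fun g => decide (i + 1 ≤ g ∧ g ≤ 1000)) : Int)) := by
  simp only [gapList_alt]
  simp only [filterMap_enumerate n l 0, zipmap, diffs_posFrom n l 0]

lemma foldl_suffStep_all (h : List Int) :
    ((PySem.List.pyRange (-1) (-(h.length : Int) - 1) (-1)).foldl suffStep (0, h)).2
      = suffAcc 0 h := by
  have key := foldl_suffStep h [] 0
  have e1 : (-(([] : List Int).length : Int) - 1) = -1 := by simp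
  have e2 : (-((h.length : Int) + (([] : List Int).length : Int)) - 1)
      = -(h.length : Int) - 1 := by simp
  rw [e1, e2, List.append_nil, List.append_nil] at key
  rw [key]

-- ===== VERDICT (by name: the statement is the Claim_ definition above) =====
theorem gapList_spec : Claim_equal_gapList := by
  intro l n _
  unfold Spec_gapList
  have hA : gapList l n
      = ((PySem.List.pyRange (-1)
            (-(((l.foldl (gapStep n) (List.replicate 1000 (0 : Int), 1, false)).1.length : Int)) - 1)
            (-1)).foldl
          suffStep (0, (l.foldl (gapStep n) (List.replicate 1000 (0 : Int), 1, false)).1)).2 := rfl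
  rw [hA, foldA_false n l (List.replicate 1000 (0 : Int))]
  set hist := (gapsAll n l).foldl inc (List.replicate 1000 (0 : Int)) with hhist
  have hlen : hist.length = 1000 := by
    rw [hhist, length_foldl_inc, List.length_replicate]
  rw [foldl_suffStep_all hist]
  rw [gapList_alt_eq l n]
  apply List.ext_getElem
  · rw [length_suffAcc, hlen, List.length_map, PySem.List.length_pyRange_one]
    omega
  · intro i hi1 hi2
    have hi : i < 1000 := by
      rw [length_suffAcc, hlen] at hi1; exact hi1
    rw [getElem_suffAcc hist 0 i (by omega)]
    rw [List.getElem_map]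
    rw [PySem.List.getElem_pyRange_one]
    have hdrop := foldl_inc_drop_sum (gapsAll n l) (gapsAll_pos n l)
        (List.replicate 1000 (0 : Int)) i
    rw [← hhist] at hdrop
    rw [hdrop]
    rw [List.drop_replicate, List.sum_replicate, List.length_replicate]
    norm_num
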